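-- pv_equiv track=rewrite | github.com/Big-Red-Macro/big-red-macro | backend/api/RAG/pipeline.py | _periods_from_gaps
-- ===== SOURCE A (Python) =====
-- from typing import List
--
-- def _period_for_gap(gap: dict) -> str:
--     start = str(gap.get("start", "12:00"))[:5]
--     try:
--         hour = int(start.split(":")[0])
--     except (TypeError, ValueError):
--         return "lunch"
--     if hour < 11:
--         return "breakfast"
--     if hour < 15:
--         return "lunch"
--     return "dinner"
--
-- def _periods_from_gaps(gaps: List[dict]) -> list:
--     periods = []
--     for gap in gaps or []:
--         period = _period_for_gap(gap)
--         if period not in periods: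
--             periods.append(period)
--     for period in ["breakfast", "lunch", "dinner"]:
--         if period not in periods:
--             periods.append(period)
--     return periods[:3]
-- ===== SOURCE B (Python) =====
-- def _period_for_gap(gap: dict) -> str:
--     start = str(gap.get("start", "12:00"))[:5]
--     try:
--         hour = int(start.split(":")[0])
--     except (TypeError, ValueError):
--         return "lunch"
--     if hour < 11:
--         return "breakfast"
--     if hour < 15:
--         return "lunch"
--     return "dinner"
--
-- def _periods_from_gaps(gaps):
--     # Rank each period by first appearance, then emit the three canonical
--     # periods in one sorted pass: seen ones first (by appearance rank),
--     # missing ones after (in canonical order).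
--     first = {}
--     for gap in gaps or []:
--         first.setdefault(_period_for_gap(gap), len(first))
--     canon = {"breakfast": 0, "lunch": 1, "dinner": 2}
--     return sorted(canon, key=lambda p: first.get(p, 3 + canon[p]))
-- ===== Notes on version B (the rewrite author's own statement) =====
-- stated objective: alternative
-- what changed: Replaces A's two membership-scanning loops (ordered dedup of per-gap periods, then append missing canonical periods, then truncate) with a first-appearance rank dict built in one pass plus a single keyed sort of the three canonical periods (seen ones by appearance rank, missing ones after in canonical order).
import Mathlib
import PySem

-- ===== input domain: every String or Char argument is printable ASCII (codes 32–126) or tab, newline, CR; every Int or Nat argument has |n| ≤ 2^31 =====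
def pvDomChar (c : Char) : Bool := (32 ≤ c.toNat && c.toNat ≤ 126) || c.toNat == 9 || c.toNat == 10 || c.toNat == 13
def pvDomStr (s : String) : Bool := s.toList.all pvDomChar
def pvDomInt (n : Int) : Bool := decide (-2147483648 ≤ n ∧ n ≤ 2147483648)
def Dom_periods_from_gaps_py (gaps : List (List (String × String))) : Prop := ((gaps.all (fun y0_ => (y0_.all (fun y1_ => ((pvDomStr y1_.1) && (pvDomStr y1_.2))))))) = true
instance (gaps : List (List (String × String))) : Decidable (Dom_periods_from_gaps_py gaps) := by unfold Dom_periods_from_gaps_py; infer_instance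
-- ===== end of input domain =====

-- B reworks only the dedup/fill decomposition: a first-appearance rank dict plus one
-- keyed sort of the three canonical periods replaces A's two membership-scanning loops.
-- Objective: alternative decomposition (no speed claim).

-- ===== PORT A =====
-- A-side helpers: port of _period_for_gap (used verbatim by both Pythons)
def periodOfHour : Option Int → String
  | none => "lunch"      -- ValueError branch of int(...)
  | some hour =>
    if hour < 11 then "breakfast"
    else if hour < 15 then "lunch"
    else "dinner"

def periodForGap (gap : List (String × String)) : String :=
  let start := PySem.Str.slice (PySem.Dict.getD ⟨gap⟩ "start" "12:00") none (some 5)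
  -- start.split(":") with sep ":" ≠ "" never fails and never yields [], so the
  -- getD/headD defaults below are unreachable
  let parts := (PySem.Str.split? start ":").getD []
  periodOfHour (PySem.Int.ofStr? (parts.headD ""))

def periods_from_gaps_py (gaps : List (List (String × String))) : List String :=
  -- 'gaps or []' iterates exactly the elements of gaps
  let periods := gaps.foldl (fun acc gap =>
    let p := periodForGap gap
    if acc.contains p then acc else acc ++ [p]) []
  let periods := ["breakfast", "lunch", "dinner"].foldl (fun acc p =>
    if acc.contains p then acc else acc ++ [p]) periods
  PySem.List.slice periods none (some 3)

-- ===== PORT B =====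
def periods_from_gaps_py_alt (gaps : List (List (String × String))) : List String :=
  let first := gaps.foldl (fun d gap =>
    d.setdefault (periodForGap gap) ((d.size : Int))) (PySem.Dict.mk [])
  let canon : PySem.Dict String Int := ⟨[("breakfast", 0), ("lunch", 1), ("dinner", 2)]⟩
  PySem.List.sorted canon.keys (fun p => ((first.get? p).getD (3 + canon.getD p 0)))

-- ===== PRECONDITION & SPEC =====
def Spec_periods_from_gaps_py (gaps : List (List (String × String))) (out : List String) : Prop := out = periods_from_gaps_py_alt gaps
instance (gaps : List (List (String × String))) (out : List String) : Decidable (Spec_periods_from_gaps_py gaps out) := by unfold Spec_periods_from_gaps_py; infer_instance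

-- ===== CLAIM (what is proved, stated in full; the proofs are below) =====
def Claim_equal_periods_from_gaps_py : Prop := ∀ (gaps : List (List (String × String))), Dom_periods_from_gaps_py gaps → Spec_periods_from_gaps_py gaps (periods_from_gaps_py gaps)

-- ===== LEMMAS AND PROOFS =====

-- the items list B's rank dict holds when the seen periods (in order) are l
def rk : List String → Nat → List (String × Int)
  | [], _ => []
  | s :: t, i => (s, (i : Int)) :: rk t (i + 1)

lemma rk_append (l : List String) (p : String) (i : Nat) :
    rk (l ++ [p]) i = rk l i ++ [(p, ((i + l.length : Nat) : Int))] := by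
  induction l generalizing i with
  | nil => simp [rk]
  | cons a t ih => simp [rk, ih, Nat.add_comm, Nat.add_left_comm]

lemma rk_length (l : List String) (i : Nat) : (rk l i).length = l.length := by
  induction l generalizing i with
  | nil => rfl
  | cons a t ih => simp [rk, ih]

lemma contains_rk (l : List String) (i : Nat) (s : String) :
    (PySem.Dict.mk (rk l i)).contains s = l.contains s := by
  induction l generalizing i with
  | nil => rfl
  | cons a t ih =>
    show ((a == s) || (rk t (i + 1)).any fun p => p.1 == s) = ((s == a) || t.contains s)
    rw [Bool.beq_comm, ← ih (i + 1)]; rfl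

lemma periodOfHour_mem (o : Option Int) :
    periodOfHour o = "breakfast" ∨ periodOfHour o = "lunch" ∨ periodOfHour o = "dinner" := by
  rcases o with _ | hour
  · simp [periodOfHour]
  · simp only [periodOfHour]; split_ifs <;> simp

lemma pfg_mem (g : List (String × String)) :
    periodForGap g = "breakfast" ∨ periodForGap g = "lunch" ∨ periodForGap g = "dinner" := by
  rw [periodForGap]
  exact periodOfHour_mem _

lemma loop_inv (gaps : List (List (String × String))) :
    ∀ acc : List String, acc.Nodup →
      (∀ x ∈ acc, x = "breakfast" ∨ x = "lunch" ∨ x = "dinner") →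
      (gaps.foldl (fun acc gap =>
          let p := periodForGap gap
          if acc.contains p then acc else acc ++ [p]) acc).Nodup
      ∧ (∀ x ∈ gaps.foldl (fun acc gap =>
          let p := periodForGap gap
          if acc.contains p then acc else acc ++ [p]) acc,
          x = "breakfast" ∨ x = "lunch" ∨ x = "dinner")
      ∧ gaps.foldl (fun d gap => d.setdefault (periodForGap gap) ((d.size : Int)))
          (PySem.Dict.mk (rk acc 0))
        = PySem.Dict.mk (rk (gaps.foldl (fun acc gap =>
            let p := periodForGap gap
            if acc.contains p then acc else acc ++ [p]) acc) 0) := by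
  induction gaps with
  | nil => exact fun acc hn hs => ⟨hn, hs, rfl⟩
  | cons g gs ih =>
    intro acc hn hs
    simp only [List.foldl_cons]
    by_cases hc : acc.contains (periodForGap g) = true
    · have hd : (PySem.Dict.mk (rk acc 0)).contains (periodForGap g) = true := by
        rw [contains_rk]; exact hc
      rw [PySem.Dict.setdefault_of_contains _ _ hd]
      simp only [hc, if_true]
      exact ih acc hn hs
    · have hc' : acc.contains (periodForGap g) = false := by
        simpa using hc
      have hd : (PySem.Dict.mk (rk acc 0)).contains (periodForGap g) = false := by
        rw [contains_rk]; exact hc'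
      rw [PySem.Dict.setdefault_of_not_contains _ _ hd]
      have hins : (PySem.Dict.mk (rk acc 0)).insert (periodForGap g)
          (((PySem.Dict.mk (rk acc 0)).size : Int))
          = PySem.Dict.mk (rk (acc ++ [periodForGap g]) 0) := by
        simp only [PySem.Dict.insert, hd, Bool.false_eq_true, if_false, PySem.Dict.size,
          rk_length, rk_append, Nat.zero_add]
      have hnotmem : periodForGap g ∉ acc := by
        simpa [List.contains_eq_any_beq] using hc'
      have hn' : (acc ++ [periodForGap g]).Nodup := by
        refine List.Nodup.append hn (List.nodup_singleton _) ?_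
        intro a ha hb
        simp only [List.mem_singleton] at hb
        exact hnotmem (hb ▸ ha)
      have hs' : ∀ x ∈ acc ++ [periodForGap g],
          x = "breakfast" ∨ x = "lunch" ∨ x = "dinner" := by
        intro x hx
        rcases List.mem_append.mp hx with hx | hx
        · exact hs x hx
        · exact (List.mem_singleton.mp hx) ▸ pfg_mem g
      rw [hins]
      simp only [hc', Bool.false_eq_true, if_false]
      exact ih (acc ++ [periodForGap g]) hn' hs'

lemma mem16 (l : List String) (hn : l.Nodup)
    (hs : ∀ x ∈ l, x = "breakfast" ∨ x = "lunch" ∨ x = "dinner") :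
    l ∈ ([[], ["breakfast"], ["lunch"], ["dinner"],
      ["breakfast","lunch"], ["breakfast","dinner"], ["lunch","breakfast"],
      ["lunch","dinner"], ["dinner","breakfast"], ["dinner","lunch"],
      ["breakfast","lunch","dinner"], ["breakfast","dinner","lunch"],
      ["lunch","breakfast","dinner"], ["lunch","dinner","breakfast"],
      ["dinner","breakfast","lunch"], ["dinner","lunch","breakfast"]] : List (List String)) := by
  match l with
  | [] => simp
  | [a] =>
    rcases hs a (by simp) with h | h | h <;> subst h <;> simp
  | [a, b] =>
    simp only [List.nodup_cons, List.mem_singleton, List.nodup_nil, and_true] at hn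
    rcases hs a (by simp) with h | h | h <;>
      rcases hs b (by simp) with h' | h' | h' <;> subst h h' <;> simp_all
  | [a, b, c] =>
    simp only [List.nodup_cons, List.mem_cons, List.nodup_nil,
      not_or, and_true] at hn
    rcases hs a (by simp) with h | h | h <;>
      rcases hs b (by simp) with h' | h' | h' <;>
      rcases hs c (by simp) with h'' | h'' | h'' <;> subst h h' h'' <;> simp_all
  | a :: b :: c :: e :: t =>
    exfalso
    simp only [List.nodup_cons, List.mem_cons, not_or] at hn
    rcases hs a (by simp) with h | h | h <;>
      rcases hs b (by simp) with h' | h' | h' <;>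
      rcases hs c (by simp) with h'' | h'' | h'' <;>
      rcases hs e (by simp) with h''' | h''' | h''' <;> subst h h' h'' h''' <;> simp_all

lemma final_step (l : List String) (hn : l.Nodup)
    (hs : ∀ x ∈ l, x = "breakfast" ∨ x = "lunch" ∨ x = "dinner") :
    PySem.List.sorted
        ((⟨[("breakfast", 0), ("lunch", 1), ("dinner", 2)]⟩ : PySem.Dict String Int)).keys
        (fun p => (((PySem.Dict.mk (rk l 0)).get? p).getD
          (3 + (⟨[("breakfast", 0), ("lunch", 1), ("dinner", 2)]⟩ : PySem.Dict String Int).getD p 0)))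
      = PySem.List.slice (["breakfast", "lunch", "dinner"].foldl (fun acc p =>
          if acc.contains p then acc else acc ++ [p]) l) none (some 3) := by
  have h16 := mem16 l hn hs
  fin_cases h16 <;> rfl

-- ===== VERDICT (by name: the statement is the Claim_ definition above) =====
theorem periods_from_gaps_py_spec : Claim_equal_periods_from_gaps_py := by
  intro gaps _
  unfold Spec_periods_from_gaps_py periods_from_gaps_py periods_from_gaps_py_alt
  obtain ⟨hn, hs, hd⟩ := loop_inv gaps [] (by simp) (by simp)
  show PySem.List.slice _ none (some 3) = PySem.List.sorted _ _
  rw [show (PySem.Dict.mk [] : PySem.Dict String Int) = PySem.Dict.mk (rk [] 0) from rfl, hd]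
  exact (final_step _ hn hs).symm
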